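-- pv_equiv track=rewrite | github.com/datstat-consulting/FreqDomainDiffForecast | DensityOneFormalProof/numerics.py | sieve_lambda_mu
-- ===== SOURCE A (Python) =====
-- from typing import List, Tuple, Dict
--
-- def sieve_spf(n: int) -> List[int]:
--     """Return smallest prime factor for every 0..n (spf[0]=spf[1]=0)."""
--     spf = [0]*(n+1)
--     for i in range(2, n+1):
--         if spf[i] == 0:
--             spf[i] = i
--             if i*i <= n:
--                 step = i
--                 start = i*i
--                 for j in range(start, n+1, step):
--                     if spf[j] == 0:
--                         spf[j] = i
--     return spf
--
-- def sieve_lambda_mu(n: int) -> Tuple[List[int], List[int]]: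
--     """Compute Liouville lambda(n)=(-1)^Ω(n) and Möbius μ(n) for n<=N using spf sieve."""
--     spf = sieve_spf(n)
--     lam = [0]*(n+1)
--     mu  = [0]*(n+1)
--     lam[1] = 1
--     mu[1]  = 1
--     for x in range(2, n+1):
--         p = spf[x]
--         y = x // p
--         k = 1
--         while y % p == 0:
--             y //= p
--             k += 1
--         lam[x] = lam[y] * ((-1)**k)
--         mu[x] = 0 if k >= 2 else -mu[y]
--     return lam, mu
-- ===== SOURCE B (Python) =====
-- def sieve_lambda_mu(n):
--     """Compute Liouville lambda and Mobius mu for all 0..n by direct per-number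
--     trial-division of the smallest prime factor (no sieve array), using the
--     one-step recurrences lam[x] = -lam[x//p], mu[x] = 0 if p | x//p else -mu[x//p]."""
--     lam = [0]*(n+1)
--     mu = [0]*(n+1)
--     lam[1] = 1
--     mu[1] = 1
--     for x in range(2, n+1):
--         p = x
--         d = 2
--         while d*d <= x:
--             if x % d == 0:
--                 p = d
--                 break
--             d += 1
--         y = x // p
--         lam[x] = -lam[y]
--         mu[x] = 0 if y % p == 0 else -mu[y]
--     return lam, mu
-- ===== Notes on version B (the rewrite author's own statement) =====
-- stated objective: alternative
-- what changed: Replaces A's two-phase algorithm (spf sieve array, then a recurrence that strips the full multiplicity p^k at once) with a single pass that finds each x's smallest prime factor by trial division up to sqrt(x) and uses the one-step recurrences lam[x] = -lam[x//p] and mu[x] = 0 if p divides x//p else -mu[x//p]; no sieve array and no inner multiplicity loop, at the cost of worse asymptotics on large n.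
-- outside the precondition, e.g. on sieve_lambda_mu(0): A raises IndexError, B raises IndexError
import Mathlib
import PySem

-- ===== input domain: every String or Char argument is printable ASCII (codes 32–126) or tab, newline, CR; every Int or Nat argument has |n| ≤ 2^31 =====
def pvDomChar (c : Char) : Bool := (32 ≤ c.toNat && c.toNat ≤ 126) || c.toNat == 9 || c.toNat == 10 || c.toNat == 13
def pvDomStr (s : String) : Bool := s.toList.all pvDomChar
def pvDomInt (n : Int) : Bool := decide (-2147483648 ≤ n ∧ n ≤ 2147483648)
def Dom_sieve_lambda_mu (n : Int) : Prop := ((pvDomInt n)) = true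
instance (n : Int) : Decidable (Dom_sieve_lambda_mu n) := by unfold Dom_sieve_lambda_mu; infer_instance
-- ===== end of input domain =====

-- B replaces A's two-phase spf-sieve + strip-the-whole-power recurrence with a single pass that
-- finds each x's smallest prime factor by trial division and uses one-step recurrences
-- lam[x] = -lam[x//p], mu[x] = 0 if p | x//p else -mu[x//p]  (alternative algorithm, not faster).

-- ===== PORT A =====
-- inner marking loop body of sieve_spf:  'if spf[j] == 0: spf[j] = i'
def pvMark (i : Int) (s : List Int) (j : Int) : List Int :=
  if PySem.List.pyGetD s j 0 = 0 then PySem.List.pySetD s j i else s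

-- outer loop body of sieve_spf
def pvStepSpf (n : Int) (s : List Int) (i : Int) : List Int :=
  if PySem.List.pyGetD s i 0 = 0 then
    let s := PySem.List.pySetD s i i
    if i * i ≤ n then (PySem.List.pyRange (i * i) (n + 1) i).foldl (pvMark i) s
    else s
  else s

def sieve_spf (n : Int) : List Int :=
  (PySem.List.pyRange 2 (n + 1) 1).foldl (pvStepSpf n) (List.replicate (n + 1).toNat 0)

-- 'while y % p == 0: y //= p; k += 1' returning the final (y, k).
-- The fuel argument (enough for every reachable call) only makes the loop structurally total.
def pvExtractGo : Nat → Int → Int → Int → Int × Int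
  | 0, _, y, k => (y, k)
  | fuel + 1, p, y, k =>
    if PySem.Int.mod y p = 0 then pvExtractGo fuel p (PySem.Int.floordiv y p) (k + 1) else (y, k)

def pvExtract (p y k : Int) : Int × Int := pvExtractGo y.toNat p y k

-- loop body of A's fill loop; '(-1)**k' is ported as '(-1)^k.toNat' (k ≥ 1 in every reachable call)
def pvStepA (spf : List Int) (lm : List Int × List Int) (x : Int) : List Int × List Int :=
  let p := PySem.List.pyGetD spf x 0
  let y := PySem.Int.floordiv x p
  let e := pvExtract p y 1
  (PySem.List.pySetD lm.1 x (PySem.List.pyGetD lm.1 e.1 0 * (-1) ^ e.2.toNat),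
   PySem.List.pySetD lm.2 x (if 2 ≤ e.2 then 0 else -(PySem.List.pyGetD lm.2 e.1 0)))

def sieve_lambda_mu (n : Int) : List Int × List Int :=
  let spf := sieve_spf n
  let lam := PySem.List.pySetD (List.replicate (n + 1).toNat 0) 1 1
  let mu := PySem.List.pySetD (List.replicate (n + 1).toNat 0) 1 1
  (PySem.List.pyRange 2 (n + 1) 1).foldl (pvStepA spf) (lam, mu)

-- ===== PORT B =====
-- 'p = x; d = 2; while d*d <= x: if x % d == 0: p = d; break; d += 1'
-- The fuel argument (enough for every reachable call) only makes the loop structurally total.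
def pvSmallestDivGo : Nat → Int → Int → Int
  | 0, x, _ => x
  | fuel + 1, x, d =>
    if d * d ≤ x then (if PySem.Int.mod x d = 0 then d else pvSmallestDivGo fuel x (d + 1)) else x

def pvSmallestDiv (x d : Int) : Int := pvSmallestDivGo (x + 1 - d).toNat x d

-- loop body of B's fill loop
def pvStepB (lm : List Int × List Int) (x : Int) : List Int × List Int :=
  let p := pvSmallestDiv x 2
  let y := PySem.Int.floordiv x p
  (PySem.List.pySetD lm.1 x (-(PySem.List.pyGetD lm.1 y 0)),
   PySem.List.pySetD lm.2 x (if PySem.Int.mod y p = 0 then 0 else -(PySem.List.pyGetD lm.2 y 0)))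

def sieve_lambda_mu_alt (n : Int) : List Int × List Int :=
  let lam := PySem.List.pySetD (List.replicate (n + 1).toNat 0) 1 1
  let mu := PySem.List.pySetD (List.replicate (n + 1).toNat 0) 1 1
  (PySem.List.pyRange 2 (n + 1) 1).foldl pvStepB (lam, mu)

-- ===== PRECONDITION & SPEC =====
-- Both programs raise IndexError on n ≤ 0 (the assignment lam[1] = 1 is out of range), so Pre_
-- excludes exactly those inputs.
def Pre_sieve_lambda_mu (n : Int) : Prop := 1 ≤ n
instance (n : Int) : Decidable (Pre_sieve_lambda_mu n) := by unfold Pre_sieve_lambda_mu; infer_instance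
def pvWitness_sieve_lambda_mu : Int := 6

def Spec_sieve_lambda_mu (n : Int) (out : List Int × List Int) : Prop := out = sieve_lambda_mu_alt n
instance (n : Int) (out : List Int × List Int) : Decidable (Spec_sieve_lambda_mu n out) := by unfold Spec_sieve_lambda_mu; infer_instance

-- ===== CLAIM (what is proved, stated in full; the proofs are below) =====
def Claim_equal_sieve_lambda_mu : Prop := ∀ (n : Int), Dom_sieve_lambda_mu n → Pre_sieve_lambda_mu n → Spec_sieve_lambda_mu n (sieve_lambda_mu n)

-- ===== LEMMAS AND PROOFS =====

-- The mathematical Liouville function, defined by the one-step recurrence both programs realise.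
def pvL (x : Nat) : Int :=
  if h : x ≤ 1 then (if x = 1 then 1 else 0)
  else -pvL (x / x.minFac)
termination_by x
decreasing_by exact Nat.div_lt_self (by omega) (Nat.minFac_prime (by omega)).one_lt

-- The mathematical Möbius function, same shape.
def pvM (x : Nat) : Int :=
  if h : x ≤ 1 then (if x = 1 then 1 else 0)
  else if x.minFac ∣ x / x.minFac then 0 else -pvM (x / x.minFac)
termination_by x
decreasing_by exact Nat.div_lt_self (by omega) (Nat.minFac_prime (by omega)).one_lt

-- canonical array contents after the fill loop has processed 2..m
def pvState (N : Nat) (F : Nat → Int) (m : Nat) : List Int :=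
  (List.range N).map (fun t => if t ≤ m then F t else 0)

-- canonical spf array after the outer sieve loop has processed 2..m
def pvSpfState (N m : Nat) : List Int :=
  (List.range N).map (fun j => if 2 ≤ j ∧ j.minFac ≤ m then (j.minFac : Int) else 0)

-- if x has no divisor in [2, d) and x < d*d, then x is its own least prime factor
theorem pvExitMinFac (x d : Nat) (hx : 2 ≤ x) (hd : 2 ≤ d) (hlt : x < d * d)
    (he : ∀ e, 2 ≤ e → e < d → ¬ e ∣ x) : x.minFac = x := by
  by_contra hne
  have hp : ¬ x.Prime := fun hp => hne (Nat.prime_def_minFac.mp hp).2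
  have hsq := Nat.minFac_sq_le_self (by omega) hp
  have h2 : 2 ≤ x.minFac := (Nat.minFac_prime (by omega)).two_le
  have hlt' : x.minFac < d := by nlinarith [hsq, hlt]
  exact he _ h2 hlt' (Nat.minFac_dvd x)

theorem pvSmallestDivGo_eq_minFac (x : Nat) (hx : 2 ≤ x) :
    ∀ (fuel d : Nat), 2 ≤ d → x + 1 - d ≤ fuel → (∀ e, 2 ≤ e → e < d → ¬ e ∣ x) →
    pvSmallestDivGo fuel (x : Int) (d : Int) = (x.minFac : Int) := by
  intro fuel
  induction fuel with
  | zero =>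
    intro d hd hdf he
    have hxd : x < d := by omega
    have hdd : x < d * d := by nlinarith
    rw [pvSmallestDivGo]
    exact_mod_cast congrArg (Nat.cast (R := Int)) (pvExitMinFac x d hx hd hdd he).symm
  | succ f IH =>
    intro d hd hdf he
    by_cases hc : d * d ≤ x
    · rw [pvSmallestDivGo, if_pos (show (d : Int) * (d : Int) ≤ (x : Int) by exact_mod_cast hc)]
      by_cases hdvd : d ∣ x
      · rw [if_pos]
        · have h1 : x.minFac ≤ d := Nat.minFac_le_of_dvd hd hdvd
          have h2 : 2 ≤ x.minFac := (Nat.minFac_prime (by omega)).two_le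
          have h3 : ¬ x.minFac < d := fun hlt => he _ h2 hlt (Nat.minFac_dvd x)
          have : d = x.minFac := by omega
          exact_mod_cast this
        · rw [PySem.Int.mod_natCast]
          norm_cast
          obtain ⟨c, rfl⟩ := hdvd
          simp [Nat.mul_mod_right]
      · rw [if_neg, show ((d : Int) + 1) = ((d + 1 : Nat) : Int) by push_cast; ring]
        · apply IH (d + 1) (by omega) (by omega)
          intro e he2 helt
          rcases Nat.lt_succ_iff_lt_or_eq.mp helt with h | h
          · exact he e he2 h
          · subst h; exact hdvd
        · rw [PySem.Int.mod_natCast]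
          intro hz
          exact hdvd (Nat.dvd_of_mod_eq_zero (by exact_mod_cast hz))
    · rw [pvSmallestDivGo, if_neg (fun hcc => hc (by exact_mod_cast hcc))]
      exact_mod_cast congrArg (Nat.cast (R := Int)) (pvExitMinFac x d hx hd (by omega) he).symm

theorem pvSmallestDiv_eq_minFac (x : Nat) (hx : 2 ≤ x) :
    ∀ d : Nat, 2 ≤ d → (∀ e, 2 ≤ e → e < d → ¬ e ∣ x) →
    pvSmallestDiv (x : Int) (d : Int) = (x.minFac : Int) := by
  intro d hd he
  rw [pvSmallestDiv]
  exact pvSmallestDivGo_eq_minFac x hx ((x : Int) + 1 - (d : Int)).toNat d hd (by omega) he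

theorem pvExtractGo_spec (p : Nat) (hp : p.Prime) :
    ∀ (y : Nat), 1 ≤ y → (∀ q, q.Prime → q ∣ y → p ≤ q) → ∀ (fuel : Nat), y ≤ fuel → ∀ (k : Nat),
    ∃ y0 k0 : Nat, pvExtractGo fuel (p : Int) (y : Int) (k : Int) = ((y0 : Int), (k0 : Int)) ∧
      1 ≤ y0 ∧ y0 ≤ y ∧
      pvL y0 * (-1) ^ k0 = pvL y * (-1) ^ k ∧
      (¬ p ∣ y → y0 = y ∧ k0 = k) ∧ (p ∣ y → k + 1 ≤ k0) := by
  intro y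
  induction y using Nat.strong_induction_on with
  | _ y IH =>
  intro hy hq fuel hfuel k
  obtain ⟨f, rfl⟩ : ∃ f, fuel = f + 1 := ⟨fuel - 1, by omega⟩
  by_cases hd : p ∣ y
  · have hpy : p ≤ y := Nat.le_of_dvd (by omega) hd
    have hm0 : PySem.Int.mod (y : Int) (p : Int) = 0 := by
      rw [PySem.Int.mod_natCast]; norm_cast
      obtain ⟨c, rfl⟩ := hd; simp [Nat.mul_mod_right]
    rw [pvExtractGo, if_pos hm0]
    rw [PySem.Int.floordiv_natCast, show ((k : Int) + 1) = ((k + 1 : Nat) : Int) by push_cast; ring]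
    have hlt : y / p < y := Nat.div_lt_self (by omega) hp.one_lt
    have hy1 : 1 ≤ y / p := (Nat.one_le_div_iff hp.pos).mpr hpy
    have hq' : ∀ q, q.Prime → q ∣ y / p → p ≤ q := fun q hqp hqd =>
      hq q hqp (hqd.trans (Nat.div_dvd_of_dvd hd))
    obtain ⟨y0, k0, heq, h1, hle, hLeq, hnd, hpd⟩ := IH (y / p) hlt hy1 hq' f (by omega) (k + 1)
    have hmf : y.minFac = p := le_antisymm (Nat.minFac_le_of_dvd hp.two_le hd)
      (hq _ (Nat.minFac_prime (by omega)) (Nat.minFac_dvd y))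
    have hLy : pvL y = -pvL (y / p) := by
      rw [pvL, dif_neg (by omega : ¬ y ≤ 1), hmf]
    refine ⟨y0, k0, heq, h1, le_trans hle (Nat.div_le_self _ _), ?_,
      fun hnd' => absurd hd hnd', fun _ => ?_⟩
    · rw [hLeq, hLy, pow_succ]; ring
    · by_cases hdd : p ∣ y / p
      · have := hpd hdd; omega
      · have := (hnd hdd).2; omega
  · have hm0 : ¬ PySem.Int.mod (y : Int) (p : Int) = 0 := by
      rw [PySem.Int.mod_natCast]
      intro hm
      exact hd (Nat.dvd_of_mod_eq_zero (by exact_mod_cast hm))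
    rw [pvExtractGo, if_neg hm0]
    exact ⟨y, k, rfl, hy, le_rfl, rfl, fun _ => ⟨rfl, rfl⟩, fun h => absurd h hd⟩

theorem pvExtract_spec (p : Nat) (hp : p.Prime) :
    ∀ (y : Nat), 1 ≤ y → (∀ q, q.Prime → q ∣ y → p ≤ q) → ∀ (k : Nat),
    ∃ y0 k0 : Nat, pvExtract (p : Int) (y : Int) (k : Int) = ((y0 : Int), (k0 : Int)) ∧
      1 ≤ y0 ∧ y0 ≤ y ∧
      pvL y0 * (-1) ^ k0 = pvL y * (-1) ^ k ∧
      (¬ p ∣ y → y0 = y ∧ k0 = k) ∧ (p ∣ y → k + 1 ≤ k0) := by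
  intro y hy hq k
  rw [pvExtract, Int.toNat_natCast]
  exact pvExtractGo_spec p hp y hy hq y le_rfl k

theorem pvState_getD (N : Nat) (F : Nat → Int) (m t : Nat) (ht : t < N) :
    (pvState N F m).getD t 0 = if t ≤ m then F t else 0 := by
  rw [List.getD_eq_getElem _ _ (by simpa [pvState] using ht)]
  simp [pvState]

theorem pvState_set (N : Nat) (F : Nat → Int) (m : Nat) (hm : m + 1 < N) :
    (pvState N F m).set (m + 1) (F (m + 1)) = pvState N F (m + 1) := by
  apply List.ext_getElem (by simp [pvState])
  intro i h1 h2
  simp only [pvState, List.getElem_set, List.getElem_map, List.getElem_range]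
  by_cases h : m + 1 = i
  · subst h; simp
  · rw [if_neg h]
    by_cases hi : i ≤ m
    · rw [if_pos hi, if_pos (by omega)]
    · rw [if_neg hi, if_neg (by omega)]

theorem pvSpfState_getD (N m t : Nat) (ht : t < N) :
    (pvSpfState N m).getD t 0 = if 2 ≤ t ∧ t.minFac ≤ m then (t.minFac : Int) else 0 := by
  rw [List.getD_eq_getElem _ _ (by simpa [pvSpfState] using ht)]
  simp [pvSpfState]

theorem pvGetD_set_of_lt (l : List Int) (i t : Nat) (v : Int) (ht : t < l.length) :
    (l.set i v).getD t 0 = if i = t then v else l.getD t 0 := by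
  rw [List.getD_eq_getElem _ _ (by simpa using ht), List.getD_eq_getElem _ _ ht, List.getElem_set]

-- the inner marking loop: every listed (non-negative) index still holding 0 receives p
theorem pvMarkFold (p : Int) (hp : p ≠ 0) :
    ∀ (J : List Int), (∀ j ∈ J, 0 ≤ j) → ∀ s : List Int,
      (J.foldl (pvMark p) s).length = s.length ∧
      ∀ t : Nat, t < s.length → (J.foldl (pvMark p) s).getD t 0 =
        if ((t : Int) ∈ J ∧ s.getD t 0 = 0) then p else s.getD t 0 := by
  intro J
  induction J with
  | nil => intro _ s; simp
  | cons j J' IH =>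
    intro hJ s
    have hj0 : 0 ≤ j := hJ j (by simp)
    have hJ' : ∀ a ∈ J', 0 ≤ a := fun a ha => hJ a (by simp [ha])
    obtain ⟨jn, rfl⟩ : ∃ jn : Nat, j = (jn : Int) := ⟨j.toNat, (Int.toNat_of_nonneg hj0).symm⟩
    simp only [List.foldl_cons]
    by_cases hz : s.getD jn 0 = 0
    · have hstep : pvMark p s (jn : Int) = s.set jn p := by
        rw [pvMark, PySem.List.pyGetD_natCast, if_pos hz, PySem.List.pySetD_natCast]
      rw [hstep]
      obtain ⟨hlen, hchar⟩ := IH hJ' (s.set jn p)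
      refine ⟨by simpa using hlen, ?_⟩
      intro t ht
      rw [hchar t (by simpa using ht), pvGetD_set_of_lt s jn t p ht]
      by_cases htj : t = jn
      · subst htj
        rw [show (if t = t then p else s.getD t 0) = p from if_pos rfl,
          if_neg (show ¬(((t : Int)) ∈ J' ∧ p = 0) by rintro ⟨-, h⟩; exact hp h),
          if_pos (show (((t : Int)) ∈ ((t : Int)) :: J' ∧ s.getD t 0 = 0) from
            ⟨List.mem_cons_self, hz⟩)]
      · rw [show (if jn = t then p else s.getD t 0) = s.getD t 0 from if_neg (fun h => htj h.symm)]
        by_cases hc : ((t : Int) ∈ J' ∧ s.getD t 0 = 0)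
        · rw [if_pos hc, if_pos ⟨List.mem_cons_of_mem _ hc.1, hc.2⟩]
        · rw [if_neg hc, if_neg ?_]
          rintro ⟨hm', hz'⟩
          rcases List.mem_cons.mp hm' with h | h
          · exact htj (by exact_mod_cast h)
          · exact hc ⟨h, hz'⟩
    · have hstep : pvMark p s (jn : Int) = s := by
        rw [pvMark, PySem.List.pyGetD_natCast, if_neg hz]
      rw [hstep]
      obtain ⟨hlen, hchar⟩ := IH hJ' s
      refine ⟨hlen, ?_⟩
      intro t ht
      rw [hchar t ht]
      by_cases hc : ((t : Int) ∈ J' ∧ s.getD t 0 = 0)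
      · rw [if_pos hc, if_pos ⟨List.mem_cons_of_mem _ hc.1, hc.2⟩]
      · rw [if_neg hc, if_neg ?_]
        rintro ⟨hm', hz'⟩
        rcases List.mem_cons.mp hm' with h | h
        · exact hz (by rw [show t = jn by exact_mod_cast h] at hz'; exact hz')
        · exact hc ⟨h, hz'⟩

theorem pvListEqOfGetD (a b : List Int) (hla : a.length = b.length)
    (h : ∀ t, t < a.length → a.getD t 0 = b.getD t 0) : a = b := by
  apply List.ext_getElem hla
  intro i h1 h2
  rw [← List.getD_eq_getElem a 0 h1, ← List.getD_eq_getElem b 0 h2]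
  exact h i h1

-- one step of the outer spf loop
theorem pvSpfStep (n : Int) (hn : 1 ≤ n) (m : Nat) (hm1 : 1 ≤ m) (hmn : ((m : Int) + 1) ≤ n) :
    pvStepSpf n (pvSpfState (n + 1).toNat m) ((m : Int) + 1) = pvSpfState (n + 1).toNat (m + 1) := by
  have hxN : m + 1 < (n + 1).toNat := by omega
  have hcast : ((m : Int) + 1) = ((m + 1 : Nat) : Int) := by push_cast; ring
  have hent := pvSpfState_getD (n + 1).toNat m (m + 1) hxN
  have hkey : ∀ t : Nat, 2 ≤ t → t ≠ m + 1 → t.minFac = m + 1 → (m + 1) * (m + 1) ≤ t := by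
    intro t ht2 htne htf
    have hnp : ¬ t.Prime := fun hp => htne (by have := (Nat.prime_def_minFac.mp hp).2; omega)
    have := Nat.minFac_sq_le_self (show 0 < t by omega) hnp
    calc (m + 1) * (m + 1) = t.minFac ^ 2 := by rw [htf]; ring
      _ ≤ t := this
  simp only [pvStepSpf, hcast, PySem.List.pyGetD_natCast, PySem.List.pySetD_natCast]
  split_ifs with h1 h2
  -- case: entry was 0 (m+1 is prime) and (m+1)^2 ≤ n : inner marking loop runs
  · rw [hent] at h1
    have hpr : ¬ (m + 1).minFac ≤ m := by
      intro hmf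
      rw [if_pos ⟨by omega, hmf⟩] at h1
      have := (Nat.minFac_prime (show m + 1 ≠ 1 by omega)).two_le
      have : (2 : Int) ≤ ((m + 1).minFac : Int) := by exact_mod_cast this
      omega
    have hfle : (m + 1).minFac ≤ m + 1 := Nat.minFac_le (by omega)
    have hprime : (m + 1).Prime := Nat.prime_def_minFac.mpr ⟨by omega, by omega⟩
    have hstep : (0 : Int) < ((m + 1 : Nat) : Int) := by exact_mod_cast Nat.succ_pos m
    have hJpos : ∀ j ∈ PySem.List.pyRange (((m + 1 : Nat) : Int) * ((m + 1 : Nat) : Int)) (n + 1) ((m + 1 : Nat) : Int), 0 ≤ j := by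
      intro j hjm
      have := ((PySem.List.mem_pyRange_iff_of_pos hstep j).mp hjm).1
      nlinarith
    obtain ⟨hlen, hchar⟩ := pvMarkFold ((m + 1 : Nat) : Int) (by exact_mod_cast Nat.succ_ne_zero m) _ hJpos
      ((pvSpfState (n + 1).toNat m).set (m + 1) ((m + 1 : Nat) : Int))
    apply pvListEqOfGetD
    · rw [hlen]; simp [pvSpfState]
    · intro t ht
      rw [hlen] at ht
      have htN : t < (n + 1).toNat := by simpa [pvSpfState] using ht
      have htn : (t : Int) ≤ n := by omega
      rw [hchar t ht, pvGetD_set_of_lt _ (m + 1) t _ (by simpa [pvSpfState] using htN),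
        pvSpfState_getD _ m t htN, pvSpfState_getD _ (m + 1) t htN]
      simp only [PySem.List.mem_pyRange_iff_of_pos hstep]
      by_cases htx : t = m + 1
      · subst htx
        rw [show (if m + 1 = m + 1 then ((m + 1 : Nat) : Int) else _) = ((m + 1 : Nat) : Int) from if_pos rfl]
        rw [if_neg ?_, if_pos ⟨by omega, by omega⟩, (Nat.prime_def_minFac.mp hprime).2]
        rintro ⟨⟨hge, -⟩, -⟩
        nlinarith
      · rw [show (if m + 1 = t then ((m + 1 : Nat) : Int) else (if 2 ≤ t ∧ t.minFac ≤ m then (t.minFac : Int) else 0)) = (if 2 ≤ t ∧ t.minFac ≤ m then (t.minFac : Int) else 0) from if_neg (fun h => htx h.symm)]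
        by_cases hold : 2 ≤ t ∧ t.minFac ≤ m
        · rw [if_pos hold]
          have hne0 : ((t.minFac : Int)) ≠ 0 := by
            have := (Nat.minFac_prime (show t ≠ 1 by omega)).two_le
            exact_mod_cast by omega
          rw [if_neg (by rintro ⟨-, h⟩; exact hne0 h), if_pos ⟨hold.1, by omega⟩]
        · by_cases ht2 : 2 ≤ t
          · have hfm : ¬ t.minFac ≤ m := fun h => hold ⟨ht2, h⟩
            rw [if_neg hold]
            by_cases hfe : t.minFac = m + 1
            · have hmul := hkey t ht2 htx hfe
              have hdvd : ((m + 1 : Nat) : Int) ∣ (t : Int) - ((m + 1 : Nat) : Int) * ((m + 1 : Nat) : Int) := by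
                have hd1 : (m + 1) ∣ t := hfe ▸ Nat.minFac_dvd t
                have hd2 : ((m + 1 : Nat) : Int) ∣ (t : Int) := by exact_mod_cast hd1
                exact dvd_sub hd2 ⟨((m + 1 : Nat) : Int), rfl⟩
              rw [if_pos ⟨⟨by exact_mod_cast hmul, by omega, hdvd⟩, rfl⟩, if_pos ⟨ht2, by omega⟩, hfe]
            · rw [if_neg ?_, if_neg (by rintro ⟨-, h⟩; omega)]
              rintro ⟨⟨-, -, hdvd⟩, -⟩
              have hd1 : ((m + 1 : Nat) : Int) ∣ (t : Int) := by
                have := dvd_add hdvd ⟨((m + 1 : Nat) : Int), rfl⟩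
                simpa using this
              have hd2 : (m + 1) ∣ t := by exact_mod_cast hd1
              have := Nat.minFac_le_of_dvd (by omega) hd2
              omega
          · rw [if_neg hold, if_neg ?_, if_neg (by rintro ⟨h, -⟩; exact ht2 h)]
            rintro ⟨⟨hge, -⟩, -⟩
            nlinarith [hge, show (t : Int) ≤ 1 by omega]
  -- case: entry was 0 (m+1 is prime) but (m+1)^2 > n : only spf[m+1] is written
  · rw [hent] at h1
    have hpr : ¬ (m + 1).minFac ≤ m := by
      intro hmf
      rw [if_pos ⟨by omega, hmf⟩] at h1
      have := (Nat.minFac_prime (show m + 1 ≠ 1 by omega)).two_le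
      have : (2 : Int) ≤ ((m + 1).minFac : Int) := by exact_mod_cast this
      omega
    apply pvListEqOfGetD
    · simp [pvSpfState]
    · intro t ht
      have htN : t < (n + 1).toNat := by simpa [pvSpfState] using ht
      rw [pvGetD_set_of_lt _ (m + 1) t _ (by simpa [pvSpfState] using htN),
        pvSpfState_getD _ m t htN, pvSpfState_getD _ (m + 1) t htN]
      have hfle : (m + 1).minFac ≤ m + 1 := Nat.minFac_le (by omega)
      have hprime : (m + 1).Prime := Nat.prime_def_minFac.mpr ⟨by omega, by omega⟩
      by_cases htx : t = m + 1
      · subst htx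
        rw [if_pos rfl, if_pos ⟨by omega, Nat.minFac_le (by omega)⟩,
          (Nat.prime_def_minFac.mp hprime).2]
      · rw [if_neg (fun h => htx h.symm)]
        by_cases hold : 2 ≤ t ∧ t.minFac ≤ m
        · rw [if_pos hold, if_pos ⟨hold.1, by omega⟩]
        · rw [if_neg hold, if_neg ?_]
          rintro ⟨ht2, hfm⟩
          by_cases hfe : t.minFac = m + 1
          · have hmul := hkey t ht2 htx hfe
            have h3 : ((m + 1 : Nat) : Int) * ((m + 1 : Nat) : Int) ≤ (t : Int) := by exact_mod_cast hmul
            have h4 : (t : Int) ≤ n := by omega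
            omega
          · exact hold ⟨ht2, by omega⟩
  -- case: entry was non-zero (spf[m+1] already set, m+1 composite): state unchanged
  · rw [hent] at h1
    have hpr : (m + 1).minFac ≤ m := by
      by_contra hmf
      exact h1 (if_neg (by rintro ⟨-, h⟩; exact hmf h))
    have hnp : ¬ (m + 1).Prime := fun h => by
      have := (Nat.prime_def_minFac.mp h).2; omega
    simp only [pvSpfState]
    apply List.map_congr_left
    intro j hj
    by_cases hc : 2 ≤ j ∧ j.minFac ≤ m
    · rw [if_pos hc, if_pos ⟨hc.1, by omega⟩]
    · rw [if_neg hc, if_neg ?_]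
      rintro ⟨hj2, hfm⟩
      rcases Nat.lt_or_ge j.minFac (m + 1) with h | h
      · exact hc ⟨hj2, by omega⟩
      · have hfe : j.minFac = m + 1 := by omega
        exact hnp (hfe ▸ Nat.minFac_prime (by omega))

theorem pvSpfLoop (n : Int) (hn : 1 ≤ n) :
    ∀ m : Nat, 1 ≤ m → (m : Int) ≤ n →
    (PySem.List.pyRange 2 ((m : Int) + 1) 1).foldl (pvStepSpf n) (List.replicate (n + 1).toNat 0)
      = pvSpfState (n + 1).toNat m := by
  intro m
  induction m with
  | zero => omega
  | succ m IH =>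
    intro _ hmn
    by_cases hm0 : m = 0
    · subst hm0
      rw [show (((0 + 1 : Nat)) : Int) + 1 = 2 by norm_num, PySem.List.pyRange_one_eq_nil (by omega)]
      simp only [List.foldl_nil]
      apply pvListEqOfGetD
      · simp [pvSpfState]
      · intro t ht
        have htN : t < (n + 1).toNat := by simpa using ht
        rw [pvSpfState_getD _ 1 t htN]
        rw [List.getD_eq_getElem _ _ ht, List.getElem_replicate]
        rw [if_neg ?_]
        rintro ⟨ht2, hf1⟩
        have := (Nat.minFac_prime (show t ≠ 1 by omega)).two_le
        omega
    · have hcast : ((m : Nat) : Int) + 1 + 1 = (((m : Nat) : Int) + 1) + 1 := by ring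
      rw [show (((m + 1 : Nat)) : Int) = ((m : Int) + 1) by push_cast; ring]
      rw [PySem.List.pyRange_one_succ_right (by omega), List.foldl_append]
      rw [IH (by omega) (by omega)]
      simp only [List.foldl_cons, List.foldl_nil]
      exact pvSpfStep n hn m (by omega) (by omega)

theorem sieve_spf_eq (n : Int) (hn : 1 ≤ n) :
    sieve_spf n = pvSpfState (n + 1).toNat n.toNat := by
  have h := pvSpfLoop n hn n.toNat (by omega) (by omega)
  rw [show ((n.toNat : Int) + 1) = n + 1 by omega] at h
  rw [sieve_spf]
  exact h

theorem pvL_zero : pvL 0 = 0 := by rw [pvL]; simp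
theorem pvL_one : pvL 1 = 1 := by rw [pvL]; simp
theorem pvM_zero : pvM 0 = 0 := by rw [pvM]; simp
theorem pvM_one : pvM 1 = 1 := by rw [pvM]; simp
theorem pvL_step (x : Nat) (hx : 2 ≤ x) : pvL x = -pvL (x / x.minFac) := by
  rw [pvL, dif_neg (by omega)]
theorem pvM_step (x : Nat) (hx : 2 ≤ x) :
    pvM x = if x.minFac ∣ x / x.minFac then 0 else -pvM (x / x.minFac) := by
  rw [pvM, dif_neg (by omega)]

theorem pvInit (n : Int) (hn : 1 ≤ n) (F : Nat → Int) (h0 : F 0 = 0) (h1 : F 1 = 1) :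
    PySem.List.pySetD (List.replicate (n + 1).toNat 0) 1 1 = pvState (n + 1).toNat F 1 := by
  rw [PySem.List.pySetD_of_nonneg _ _ (by norm_num : (0:Int) ≤ 1), show (1 : Int).toNat = 1 from rfl]
  apply pvListEqOfGetD
  · simp [pvState]
  · intro t ht
    have htN : t < (n + 1).toNat := by simpa using ht
    rw [pvGetD_set_of_lt _ 1 t _ (by simpa using htN), pvState_getD _ F 1 t htN]
    by_cases h : 1 = t
    · rw [if_pos h, if_pos (by omega), ← h, h1]
    · rw [if_neg h, List.getD_eq_getElem _ _ (by simpa using htN), List.getElem_replicate]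
      by_cases h2 : t ≤ 1
      · rw [if_pos h2, show t = 0 by omega, h0]
      · rw [if_neg h2]

-- B's loop body maps the canonical state for m to the one for m+1
theorem pvStepB_eq (n : Int) (hn : 1 ≤ n) (m : Nat) (hm1 : 1 ≤ m) (hmn : ((m : Int) + 1) ≤ n) :
    pvStepB (pvState (n + 1).toNat pvL m, pvState (n + 1).toNat pvM m) ((m : Int) + 1)
      = (pvState (n + 1).toNat pvL (m + 1), pvState (n + 1).toNat pvM (m + 1)) := by
  have hxN : m + 1 < (n + 1).toNat := by omega
  have hcast : ((m : Int) + 1) = ((m + 1 : Nat) : Int) := by push_cast; ring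
  have hp := pvSmallestDiv_eq_minFac (m + 1) (by omega) 2 le_rfl (by omega)
  rw [show ((2 : Nat) : Int) = (2 : Int) by norm_num] at hp
  have hpprime : (m + 1).minFac.Prime := Nat.minFac_prime (by omega)
  have hylt : (m + 1) / (m + 1).minFac < m + 1 := Nat.div_lt_self (by omega) hpprime.one_lt
  have hy1 : 1 ≤ (m + 1) / (m + 1).minFac :=
    (Nat.one_le_div_iff hpprime.pos).mpr (Nat.minFac_le (by omega))
  have hgL : (pvState (n + 1).toNat pvL m).getD ((m + 1) / (m + 1).minFac) 0
      = pvL ((m + 1) / (m + 1).minFac) := by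
    rw [pvState_getD _ _ _ _ (by omega), if_pos (by omega)]
  have hgM : (pvState (n + 1).toNat pvM m).getD ((m + 1) / (m + 1).minFac) 0
      = pvM ((m + 1) / (m + 1).minFac) := by
    rw [pvState_getD _ _ _ _ (by omega), if_pos (by omega)]
  have hmod : PySem.Int.mod (((m + 1) / (m + 1).minFac : Nat) : Int) (((m + 1).minFac : Nat) : Int)
      = (((m + 1) / (m + 1).minFac % (m + 1).minFac : Nat) : Int) := PySem.Int.mod_natCast _ _
  simp only [pvStepB, hcast, hp, PySem.Int.floordiv_natCast, PySem.List.pyGetD_natCast,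
    PySem.List.pySetD_natCast, hmod, hgL, hgM, Prod.mk.injEq]
  refine ⟨?_, ?_⟩
  · rw [show -pvL ((m + 1) / (m + 1).minFac) = pvL (m + 1) from (pvL_step (m + 1) (by omega)).symm]
    exact pvState_set _ pvL m hxN
  · by_cases hdd : (m + 1).minFac ∣ (m + 1) / (m + 1).minFac
    · have hz : (((m + 1) / (m + 1).minFac % (m + 1).minFac : Nat) : Int) = 0 := by
        norm_cast
        obtain ⟨c, hc⟩ := hdd
        rw [hc]
        simp [Nat.mul_mod_right]
      rw [if_pos hz, show (0 : Int) = pvM (m + 1) by rw [pvM_step (m + 1) (by omega), if_pos hdd]]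
      exact pvState_set _ pvM m hxN
    · have hz : ¬(((m + 1) / (m + 1).minFac % (m + 1).minFac : Nat) : Int) = 0 := by
        norm_cast
        intro h
        exact hdd (Nat.dvd_of_mod_eq_zero h)
      rw [if_neg hz, show -pvM ((m + 1) / (m + 1).minFac) = pvM (m + 1) by
        rw [pvM_step (m + 1) (by omega), if_neg hdd]]
      exact pvState_set _ pvM m hxN

theorem pvFillLoopB (n : Int) (hn : 1 ≤ n) :
    ∀ m : Nat, 1 ≤ m → (m : Int) ≤ n →
    (PySem.List.pyRange 2 ((m : Int) + 1) 1).foldl pvStepB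
      (PySem.List.pySetD (List.replicate (n + 1).toNat 0) 1 1,
       PySem.List.pySetD (List.replicate (n + 1).toNat 0) 1 1)
      = (pvState (n + 1).toNat pvL m, pvState (n + 1).toNat pvM m) := by
  intro m
  induction m with
  | zero => omega
  | succ m IH =>
    intro _ hmn
    by_cases hm0 : m = 0
    · subst hm0
      rw [show (((0 + 1 : Nat)) : Int) + 1 = 2 by norm_num, PySem.List.pyRange_one_eq_nil (by omega)]
      simp only [List.foldl_nil, Prod.mk.injEq]
      exact ⟨pvInit n hn pvL pvL_zero pvL_one, pvInit n hn pvM pvM_zero pvM_one⟩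
    · rw [show (((m + 1 : Nat)) : Int) = ((m : Int) + 1) by push_cast; ring,
        PySem.List.pyRange_one_succ_right (by omega), List.foldl_append]
      rw [IH (by omega) (by omega)]
      simp only [List.foldl_cons, List.foldl_nil]
      exact pvStepB_eq n hn m (by omega) (by omega)

theorem fillB (n : Int) (hn : 1 ≤ n) :
    sieve_lambda_mu_alt n = (pvState (n + 1).toNat pvL n.toNat, pvState (n + 1).toNat pvM n.toNat) := by
  simp only [sieve_lambda_mu_alt]
  have h := pvFillLoopB n hn n.toNat (by omega) (by omega)
  rw [show ((n.toNat : Int) + 1) = n + 1 by omega] at h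
  exact h

-- A's loop body maps the canonical state for m to the one for m+1
theorem pvStepA_eq (n : Int) (hn : 1 ≤ n) (m : Nat) (hm1 : 1 ≤ m) (hmn : ((m : Int) + 1) ≤ n) :
    pvStepA (pvSpfState (n + 1).toNat n.toNat)
      (pvState (n + 1).toNat pvL m, pvState (n + 1).toNat pvM m) ((m : Int) + 1)
      = (pvState (n + 1).toNat pvL (m + 1), pvState (n + 1).toNat pvM (m + 1)) := by
  have hxN : m + 1 < (n + 1).toNat := by omega
  have hcast : ((m : Int) + 1) = ((m + 1 : Nat) : Int) := by push_cast; ring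
  have hpprime : (m + 1).minFac.Prime := Nat.minFac_prime (by omega)
  have hentry : (pvSpfState (n + 1).toNat n.toNat).getD (m + 1) 0 = (((m + 1).minFac : Nat) : Int) := by
    rw [pvSpfState_getD _ _ _ hxN,
      if_pos ⟨by omega, by have := Nat.minFac_le (show 0 < m + 1 by omega); omega⟩]
  have hy1 : 1 ≤ (m + 1) / (m + 1).minFac :=
    (Nat.one_le_div_iff hpprime.pos).mpr (Nat.minFac_le (by omega))
  have hylt : (m + 1) / (m + 1).minFac < m + 1 := Nat.div_lt_self (by omega) hpprime.one_lt
  have hq : ∀ q, q.Prime → q ∣ (m + 1) / (m + 1).minFac → (m + 1).minFac ≤ q := by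
    intro q hqp hqd
    exact Nat.minFac_le_of_dvd hqp.two_le (hqd.trans (Nat.div_dvd_of_dvd (Nat.minFac_dvd _)))
  obtain ⟨y0, k0, heq, hy0, hle, hLeq, hnd, hpd⟩ :=
    pvExtract_spec (m + 1).minFac hpprime ((m + 1) / (m + 1).minFac) hy1 hq 1
  rw [Nat.cast_one] at heq
  have hgL : (pvState (n + 1).toNat pvL m).getD y0 0 = pvL y0 := by
    rw [pvState_getD _ _ _ _ (by omega), if_pos (by omega)]
  have hgM : (pvState (n + 1).toNat pvM m).getD y0 0 = pvM y0 := by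
    rw [pvState_getD _ _ _ _ (by omega), if_pos (by omega)]
  simp only [pvStepA, hcast, hentry, PySem.Int.floordiv_natCast, heq, PySem.List.pyGetD_natCast,
    PySem.List.pySetD_natCast, Int.toNat_natCast, hgL, hgM, Prod.mk.injEq]
  refine ⟨?_, ?_⟩
  · rw [show pvL y0 * (-1) ^ k0 = pvL (m + 1) by
      rw [hLeq, pow_one, pvL_step (m + 1) (by omega)]; ring]
    exact pvState_set _ pvL m hxN
  · by_cases hdd : (m + 1).minFac ∣ (m + 1) / (m + 1).minFac
    · have hk2 := hpd hdd
      rw [if_pos (show (2 : Int) ≤ (k0 : Int) by exact_mod_cast hk2),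
        show (0 : Int) = pvM (m + 1) by rw [pvM_step (m + 1) (by omega), if_pos hdd]]
      exact pvState_set _ pvM m hxN
    · obtain ⟨hy0e, hk0e⟩ := hnd hdd
      rw [if_neg (show ¬(2 : Int) ≤ (k0 : Int) by rw [hk0e]; norm_num), hy0e,
        show -pvM ((m + 1) / (m + 1).minFac) = pvM (m + 1) by
          rw [pvM_step (m + 1) (by omega), if_neg hdd]]
      exact pvState_set _ pvM m hxN

theorem pvFillLoopA (n : Int) (hn : 1 ≤ n) :
    ∀ m : Nat, 1 ≤ m → (m : Int) ≤ n →
    (PySem.List.pyRange 2 ((m : Int) + 1) 1).foldl (pvStepA (pvSpfState (n + 1).toNat n.toNat))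
      (PySem.List.pySetD (List.replicate (n + 1).toNat 0) 1 1,
       PySem.List.pySetD (List.replicate (n + 1).toNat 0) 1 1)
      = (pvState (n + 1).toNat pvL m, pvState (n + 1).toNat pvM m) := by
  intro m
  induction m with
  | zero => omega
  | succ m IH =>
    intro _ hmn
    by_cases hm0 : m = 0
    · subst hm0
      rw [show (((0 + 1 : Nat)) : Int) + 1 = 2 by norm_num, PySem.List.pyRange_one_eq_nil (by omega)]
      simp only [List.foldl_nil, Prod.mk.injEq]
      exact ⟨pvInit n hn pvL pvL_zero pvL_one, pvInit n hn pvM pvM_zero pvM_one⟩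
    · rw [show (((m + 1 : Nat)) : Int) = ((m : Int) + 1) by push_cast; ring,
        PySem.List.pyRange_one_succ_right (by omega), List.foldl_append]
      rw [IH (by omega) (by omega)]
      simp only [List.foldl_cons, List.foldl_nil]
      exact pvStepA_eq n hn m (by omega) (by omega)

theorem fillA (n : Int) (hn : 1 ≤ n) :
    sieve_lambda_mu n = (pvState (n + 1).toNat pvL n.toNat, pvState (n + 1).toNat pvM n.toNat) := by
  simp only [sieve_lambda_mu, sieve_spf_eq n hn]
  have h := pvFillLoopA n hn n.toNat (by omega) (by omega)
  rw [show ((n.toNat : Int) + 1) = n + 1 by omega] at h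
  exact h

-- ===== VERDICT (by name: the statement is the Claim_ definition above) =====
theorem sieve_lambda_mu_spec : Claim_equal_sieve_lambda_mu := by
  intro n _ hn
  unfold Spec_sieve_lambda_mu
  rw [fillA n hn, fillB n hn]
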